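-- pv_equiv track=rewrite | github.com/beomxtone/coding-test | Baekjoon/Gold V/7490번: 0 만들기/[BOJ]7490.py | makeSeq
-- ===== SOURCE A (Python) =====
-- def makeSeq(nums, oprs):
--   idx = 1
--   tmp = str(nums[0])
--   isPstv = True
--   res = 0
--
--   for opr in oprs:
--     # opr가 공백이면 tmp 값과 이어붙인다
--     if opr == ' ':
--       tmp += str(nums[idx])
--
--     else:
--       # opr가 +나 -이면 이전 저장값을 seq에 더하거나 뺀다
--       res += int(tmp) if isPstv else -1*int(tmp)
--
--       if opr == '+':
--         isPstv = True
--       else: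
--         isPstv = False
--       tmp = str(nums[idx])
--
--     idx += 1
--
--   # 맨 마지막 남은 tmp값을 더하거나 뺀다
--   if tmp:
--     res += int(tmp) if isPstv else -1*int(tmp)
--
--   return True if res == 0 else False
-- ===== SOURCE B (Python) =====
-- def makeSeq(nums, oprs):
--   # Pass 1: render the whole expression as one flat string (any operator other
--   # than ' ' and '+' acts as '-', exactly as in the original).
--   expr = str(nums[0])
--   for opr, n in zip(oprs, nums[1:]):
--     expr += str(n) if opr == ' ' else ('+' if opr == '+' else '-') + str(n)
--   # Pass 2: a '+'/'-' character that follows a digit is a token boundary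
--   # (a '+'/'-' elsewhere is the sign of a number); cut the string there.
--   cuts = [i for i in range(1, len(expr)) if expr[i] in '+-' and expr[i - 1].isdigit()]
--   pieces = [expr[a:b] for a, b in zip([0] + cuts, cuts + [len(expr)])]
--   total = int(pieces[0]) + sum(int(p[1:]) if p[0] == '+' else -int(p[1:]) for p in pieces[1:])
--   return total == 0
-- ===== Notes on version B (the rewrite author's own statement) =====
-- stated objective: alternative
-- what changed: A evaluates with one state machine over the operator list (running result, pending literal, sign flag); B renders the whole expression to a single flat string, then computes token-boundary indices (a '+'/'-' following a digit) and evaluates by slicing the string at those cuts and summing the signed pieces.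
import Mathlib
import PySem

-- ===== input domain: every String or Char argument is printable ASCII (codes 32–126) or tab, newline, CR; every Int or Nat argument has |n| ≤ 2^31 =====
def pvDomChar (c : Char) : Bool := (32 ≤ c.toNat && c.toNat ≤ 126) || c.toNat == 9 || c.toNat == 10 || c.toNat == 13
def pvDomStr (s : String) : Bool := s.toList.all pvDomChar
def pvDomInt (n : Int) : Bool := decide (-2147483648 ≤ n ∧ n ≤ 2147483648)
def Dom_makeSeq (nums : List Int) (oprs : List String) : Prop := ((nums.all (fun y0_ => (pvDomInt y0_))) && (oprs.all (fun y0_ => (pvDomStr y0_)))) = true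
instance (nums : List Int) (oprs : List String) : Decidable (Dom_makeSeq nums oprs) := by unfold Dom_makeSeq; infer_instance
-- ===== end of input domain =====

-- ===== PORT A =====
-- B replaces A's state machine over the operator list by render-to-one-string + cut-at-boundary-indices
-- evaluation ("alternative" objective); return values proved equal on Pre_.
-- Python str values are ported as List Char; int(s) = PySem.Int.ofChars?, str(n) = PySem.Int.toChars.
-- A's loop body (state: idx, tmp, isPstv, res); where Python would raise (IndexError / ValueError of int)
-- the port takes the getD default — those inputs are exactly the ones Pre_makeSeq excludes.
def stepA (nums : List Int) (s : Int × List Char × Bool × Int) (opr : String) : Int × List Char × Bool × Int :=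
  if opr = " " then
    (s.1 + 1, s.2.1 ++ PySem.Int.toChars (PySem.List.pyGetD nums s.1 0), s.2.2.1, s.2.2.2)
  else
    (s.1 + 1, PySem.Int.toChars (PySem.List.pyGetD nums s.1 0), decide (opr = "+"),
      s.2.2.2 + (if s.2.2.1 then (PySem.Int.ofChars? s.2.1).getD 0 else -1 * (PySem.Int.ofChars? s.2.1).getD 0))

def makeSeq (nums : List Int) (oprs : List String) : Bool :=
  let st := oprs.foldl (stepA nums) (1, PySem.Int.toChars (PySem.List.pyGetD nums 0 0), true, 0)
  let res :=
    if st.2.1 ≠ [] then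
      st.2.2.2 + (if st.2.2.1 then (PySem.Int.ofChars? st.2.1).getD 0 else -1 * (PySem.Int.ofChars? st.2.1).getD 0)
    else st.2.2.2
  if res = 0 then true else false

-- ===== PORT B =====
-- Source B pass 1: expr += str(n) if opr == ' ' else ('+' if opr == '+' else '-') + str(n)
def renderStep (e : List Char) (p : String × Int) : List Char :=
  if p.1 = " " then e ++ PySem.Int.toChars p.2
  else e ++ (if p.1 = "+" then '+' else '-') :: PySem.Int.toChars p.2

-- Source B boundary test: expr[i] in '+-' and expr[i-1].isdigit()  (expr is ASCII, so Char.isDigit is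
-- exactly Python's str.isdigit here; indices are in range, so the pyGetD default '?' is never read)
def cutP (expr : List Char) (i : Int) : Bool :=
  (PySem.List.pyGetD expr i '?' == '+' || PySem.List.pyGetD expr i '?' == '-') &&
    (PySem.List.pyGetD expr (i - 1) '?').isDigit

-- Source B: int(p[1:]) if p[0] == '+' else -int(p[1:])   (int() raises only outside Pre_makeSeq → getD)
def pieceVal (p : List Char) : Int :=
  if PySem.List.pyGetD p 0 '?' = '+' then (PySem.Int.ofChars? (PySem.List.slice p (some 1) none)).getD 0
  else -(PySem.Int.ofChars? (PySem.List.slice p (some 1) none)).getD 0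

def makeSeq_alt (nums : List Int) (oprs : List String) : Bool :=
  let expr := (oprs.zip (PySem.List.slice nums (some 1) none)).foldl renderStep
      (PySem.Int.toChars (PySem.List.pyGetD nums 0 0))
  let cuts := (PySem.List.pyRange 1 (expr.length : Int) 1).filter (cutP expr)
  let pieces := ((0 :: cuts).zip (cuts ++ [(expr.length : Int)])).map
      (fun ab => PySem.List.slice expr (some ab.1) (some ab.2))
  let total := (PySem.Int.ofChars? (PySem.List.pyGetD pieces 0 [])).getD 0 +
      ((PySem.List.slice pieces (some 1) none).map pieceVal).sum
  decide (total = 0)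

-- ===== PRECONDITION & SPEC =====
-- Pre_ = exactly the inputs where Python A returns: nums must cover nums[0] and one number per operator
-- (else IndexError), and a number glued on by a ' ' operator must be nonnegative (else its '-' lands
-- inside the literal and int(tmp) raises ValueError).
def Pre_makeSeq (nums : List Int) (oprs : List String) : Prop :=
  oprs.length < nums.length ∧ ∀ p ∈ oprs.zip (nums.drop 1), p.1 = " " → 0 ≤ p.2
instance (nums : List Int) (oprs : List String) : Decidable (Pre_makeSeq nums oprs) := by
  unfold Pre_makeSeq; infer_instance

def pvWitness_makeSeq : List Int × List String := ([1, -1], ["-"])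

def Spec_makeSeq (nums : List Int) (oprs : List String) (out : Bool) : Prop := out = makeSeq_alt nums oprs
instance (nums : List Int) (oprs : List String) (out : Bool) : Decidable (Spec_makeSeq nums oprs out) := by
  unfold Spec_makeSeq; infer_instance

-- ===== CLAIM (what is proved, stated in full; the proofs are below) =====
def Claim_equal_makeSeq : Prop := ∀ (nums : List Int) (oprs : List String), Dom_makeSeq nums oprs → Pre_makeSeq nums oprs → Spec_makeSeq nums oprs (makeSeq nums oprs)

-- ===== LEMMAS AND PROOFS =====

-- Proof-side view of A's loop: the idx bookkeeping replaced by a fold over (operator, number) pairs.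
def fpA (t : List Char × Bool × Int) (p : String × Int) : List Char × Bool × Int :=
  if p.1 = " " then (t.1 ++ PySem.Int.toChars p.2, t.2.1, t.2.2)
  else (PySem.Int.toChars p.2, decide (p.1 = "+"),
    t.2.2 + (if t.2.1 then (PySem.Int.ofChars? t.1).getD 0 else -1 * (PySem.Int.ofChars? t.1).getD 0))

-- Token view shared by both proofs: a list of (sign, group-literal) pairs.
def vG (g : List Char) : Int := (PySem.Int.ofChars? g).getD 0
def sgnV (t : Bool × List Char) : Int := if t.1 then vG t.2 else -vG t.2
def sumT (l : List (Bool × List Char)) : Int := (l.map sgnV).sum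
def sepC (b : Bool) : Char := if b then '+' else '-'
def flatTs (ts : List (Bool × List Char)) : List Char := (ts.map (fun t => sepC t.1 :: t.2)).flatten
def exprOfT : List (Bool × List Char) → List Char
  | [] => []
  | t :: ts => t.2 ++ flatTs ts
def sepPos : Nat → List (Bool × List Char) → List Int
  | _, [] => []
  | off, t :: ts => (off : Int) :: sepPos (off + 1 + t.2.length) ts

-- The tokenizer fold both loop proofs are reduced to: state (finished tokens, current sign, current group).
def tokStep (σ : List (Bool × List Char) × Bool × List Char) (p : String × Int) :
    List (Bool × List Char) × Bool × List Char :=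
  if p.1 = " " then (σ.1, σ.2.1, σ.2.2 ++ PySem.Int.toChars p.2)
  else (σ.1 ++ [(σ.2.1, σ.2.2)], decide (p.1 = "+"), PySem.Int.toChars p.2)

def digitsOnly (l : List Char) : Prop := ∀ c ∈ l, c.isDigit
def Good (g : List Char) : Prop :=
  ∃ h t, g = h :: t ∧ digitsOnly t ∧ (h.isDigit = true ∨ (h = '-' ∧ t ≠ []))
def GoodSt (σ : List (Bool × List Char) × Bool × List Char) : Prop :=
  (∀ t ∈ σ.1, Good t.2) ∧ Good σ.2.2 ∧
    (match σ.1 with | [] => σ.2.1 = true | t :: _ => t.1 = true)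

lemma good_toChars (n : Int) : Good (PySem.Int.toChars n) := by
  unfold PySem.Int.toChars Good
  split
  · exact ⟨'-', _, rfl, fun c hc => Nat.isDigit_of_mem_toDigits (by norm_num) (le_refl 10) hc,
      Or.inr ⟨rfl, by simp [← List.length_pos_iff, Nat.length_toDigits_pos]⟩⟩
  · rcases e : Nat.toDigits 10 _ with _ | ⟨h, t⟩
    · have h10 : 0 < (Nat.toDigits 10 n.toNat).length := Nat.length_toDigits_pos
      rw [e] at h10; simp at h10
    · refine ⟨h, t, rfl, fun c hc => ?_, Or.inl ?_⟩
      · exact Nat.isDigit_of_mem_toDigits (by norm_num) (le_refl 10) (e ▸ List.mem_cons_of_mem h hc)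
      · exact Nat.isDigit_of_mem_toDigits (by norm_num) (le_refl 10) (e ▸ List.mem_cons_self)

lemma good_append_digits (g x : List Char) (hg : Good g) (hx : digitsOnly x) : Good (g ++ x) := by
  obtain ⟨h, t, rfl, ht, hh⟩ := hg
  refine ⟨h, t ++ x, rfl, fun c hc => ?_, ?_⟩
  · rcases List.mem_append.1 hc with h' | h'
    · exact ht c h'
    · exact hx c h'
  · rcases hh with h' | ⟨h1, h2⟩
    · exact Or.inl h'
    · exact Or.inr ⟨h1, List.append_ne_nil_of_left_ne_nil h2 _⟩

lemma good_ne_nil (g : List Char) (hg : Good g) : g ≠ [] := by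
  obtain ⟨h, t, rfl, -, -⟩ := hg; simp

lemma good_pos (g : List Char) (hg : Good g) : 0 < g.length := by
  obtain ⟨h, t, rfl, -, -⟩ := hg; simp

lemma good_getElem_digit (g : List Char) (hg : Good g) (k : Nat) (hk : k < g.length) (h0 : 0 < k) :
    (g[k]).isDigit = true := by
  obtain ⟨h, t, rfl, ht, -⟩ := hg
  have : (h :: t)[k] = t[k - 1]'(by simp at hk; omega) := by
    rcases k with _ | k
    · omega
    · simp
  rw [this]
  exact ht _ (List.getElem_mem _)

lemma good_last_digit (g : List Char) (hg : Good g) (hk : g.length - 1 < g.length) :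
    (g[g.length - 1]).isDigit = true := by
  obtain ⟨h, t, rfl, ht, hh⟩ := hg
  rcases t with _ | ⟨c, t⟩
  · simpa using hh.elim id (fun h => absurd rfl h.2)
  · exact good_getElem_digit _ ⟨h, c :: t, rfl, ht, hh⟩ _ hk (by simp)

lemma isDigit_ne_plus {c : Char} (h : c.isDigit = true) : c ≠ '+' := by
  intro e; subst e; exact absurd h (by decide)

lemma isDigit_ne_minus {c : Char} (h : c.isDigit = true) : c ≠ '-' := by
  intro e; subst e; exact absurd h (by decide)

lemma isDigit_sepC (b : Bool) : (sepC b).isDigit = false := by cases b <;> decide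

-- indexing helpers
lemma pyGetD_append_right (pre g : List Char) (k : Nat) (hk : k < g.length) (d : Char) :
    PySem.List.pyGetD (pre ++ g) ((pre.length + k : Nat) : Int) d = g[k] := by
  rw [PySem.List.pyGetD_natCast]
  rw [List.getD_eq_getElem?_getD, List.getElem?_append_right (by omega)]
  simp [hk]

lemma pyGetD_append_left (pre g : List Char) (k : Nat) (hk : k < pre.length) (d : Char) :
    PySem.List.pyGetD (pre ++ g) ((k : Nat) : Int) d = pre[k] := by
  rw [PySem.List.pyGetD_natCast]
  rw [List.getD_eq_getElem?_getD, List.getElem?_append_left hk]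
  simp [hk]

-- A's fold, reindexed: from index j on, it consumes exactly zip oprs (nums.drop j).
lemma foldA_reindex (oprs : List String) (nums : List Int) :
    ∀ (j : Nat) (t : List Char × Bool × Int), j + oprs.length ≤ nums.length →
      (oprs.foldl (stepA nums) ((j : Int), t)).2 = (oprs.zip (nums.drop j)).foldl fpA t := by
  induction oprs with
  | nil => intro j t h; simp
  | cons opr oprs ih =>
    intro j t h
    have hj : j < nums.length := by simp at h; omega
    have hdrop : nums.drop j = nums[j] :: nums.drop (j + 1) := List.drop_eq_getElem_cons hj
    have hget : PySem.List.pyGetD nums ((j : Int)) 0 = nums[j] := by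
      simp [PySem.List.pyGetD_natCast, List.getD_eq_getElem?_getD, hj]
    have hstep : stepA nums ((j : Int), t) opr = (((j + 1 : Nat) : Int), fpA t (opr, nums[j])) := by
      by_cases hop : opr = " " <;> simp [stepA, fpA, hop, hget]
    rw [hdrop]
    simp only [List.zip_cons_cons, List.foldl_cons, hstep]
    exact ih (j + 1) (fpA t (opr, nums[j])) (by simp at h ⊢; omega)

lemma sumT_append_singleton (l : List (Bool × List Char)) (x : Bool × List Char) :
    sumT (l ++ [x]) = sumT l + sgnV x := by
  simp [sumT]

-- A's fold state is the tokenizer's state.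
lemma fpA_tok (l : List (String × Int)) :
    ∀ (σ : List (Bool × List Char) × Bool × List Char),
      l.foldl fpA (σ.2.2, σ.2.1, sumT σ.1)
        = ((l.foldl tokStep σ).2.2, (l.foldl tokStep σ).2.1, sumT (l.foldl tokStep σ).1) := by
  induction l with
  | nil => intro σ; rfl
  | cons p l ih =>
    intro σ
    have hstep : fpA (σ.2.2, σ.2.1, sumT σ.1) p
        = ((tokStep σ p).2.2, (tokStep σ p).2.1, sumT (tokStep σ p).1) := by
      by_cases hop : p.1 = " "
      · simp [fpA, tokStep, hop]
      · simp only [fpA, tokStep, hop, if_neg, ite_false, sumT_append_singleton, sgnV, vG]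
        refine Prod.ext rfl (Prod.ext rfl ?_)
        simp only
        split <;> ring
    simp only [List.foldl_cons, hstep]
    exact ih (tokStep σ p)

lemma flatTs_append_singleton (ts : List (Bool × List Char)) (t : Bool × List Char) :
    flatTs (ts ++ [t]) = flatTs ts ++ sepC t.1 :: t.2 := by
  simp [flatTs]

lemma exprOfT_append_chars (fin : List (Bool × List Char)) (b : Bool) (g x : List Char) :
    exprOfT (fin ++ [(b, g)]) ++ x = exprOfT (fin ++ [(b, g ++ x)]) := by
  rcases fin with _ | ⟨t, ts⟩
  · simp [exprOfT, flatTs]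
  · simp [exprOfT, flatTs_append_singleton]

lemma exprOfT_push (fin : List (Bool × List Char)) (b b' : Bool) (g x : List Char) :
    exprOfT (fin ++ [(b, g)]) ++ sepC b' :: x = exprOfT ((fin ++ [(b, g)]) ++ [(b', x)]) := by
  rcases fin with _ | ⟨t, ts⟩
  · simp [exprOfT, flatTs]
  · simp [exprOfT, flatTs_append_singleton, flatTs]

-- B's rendering fold builds exactly the flat string of the tokenizer's state.
lemma render_tok (l : List (String × Int)) :
    ∀ (σ : List (Bool × List Char) × Bool × List Char),
      l.foldl renderStep (exprOfT (σ.1 ++ [(σ.2.1, σ.2.2)]))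
        = exprOfT ((l.foldl tokStep σ).1 ++ [((l.foldl tokStep σ).2.1, (l.foldl tokStep σ).2.2)]) := by
  induction l with
  | nil => intro σ; rfl
  | cons p l ih =>
    intro σ
    have hstep : renderStep (exprOfT (σ.1 ++ [(σ.2.1, σ.2.2)])) p
        = exprOfT ((tokStep σ p).1 ++ [((tokStep σ p).2.1, (tokStep σ p).2.2)]) := by
      by_cases hop : p.1 = " "
      · simp only [renderStep, tokStep, hop, if_pos, if_true]
        exact exprOfT_append_chars _ _ _ _
      · simp only [renderStep, tokStep, hop, if_neg, ite_false, if_false]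
        have : (if p.1 = "+" then '+' else '-') = sepC (decide (p.1 = "+")) := by
          by_cases h : p.1 = "+" <;> simp [sepC, h]
        rw [this]
        exact exprOfT_push _ _ _ _ _
    simp only [List.foldl_cons, hstep]
    exact ih (tokStep σ p)

-- the Good invariant along the tokenizer
lemma tok_good (l : List (String × Int)) :
    ∀ (σ : List (Bool × List Char) × Bool × List Char),
      (∀ p ∈ l, p.1 = " " → 0 ≤ p.2) → GoodSt σ → GoodSt (l.foldl tokStep σ) := by
  induction l with
  | nil => intro σ _ h; exact h
  | cons p l ih =>
    intro σ hp h
    refine ih (tokStep σ p) (fun q hq => hp q (List.mem_cons_of_mem _ hq)) ?_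
    obtain ⟨fin, sgn, cur⟩ := σ
    obtain ⟨hfin, hcur, hhd⟩ := h
    by_cases hop : p.1 = " "
    · refine ⟨by simpa [tokStep, hop] using hfin, ?_, ?_⟩
      · simp only [tokStep, hop, if_pos]
        refine good_append_digits _ _ hcur ?_
        have hn : 0 ≤ p.2 := hp p (List.mem_cons_self) hop
        intro c hc
        unfold PySem.Int.toChars at hc
        rw [if_neg (by omega)] at hc
        exact Nat.isDigit_of_mem_toDigits (by norm_num) (le_refl 10) hc
      · simpa [tokStep, hop] using hhd
    · refine ⟨?_, ?_, ?_⟩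
      · simp only [tokStep, hop, if_neg, ite_false]
        intro t ht
        rcases List.mem_append.1 ht with h' | h'
        · exact hfin t h'
        · simp at h'; subst h'; exact hcur
      · simp only [tokStep, hop, if_neg, ite_false]
        exact good_toChars _
      · simp only [tokStep, hop, if_neg, ite_false]
        rcases fin with _ | ⟨t, ts⟩ <;> simpa using hhd

-- final token list has shape (true, g0) :: ts with all groups Good
lemma good_shape (σ : List (Bool × List Char) × Bool × List Char) (h : GoodSt σ) :
    ∃ g0 ts, σ.1 ++ [(σ.2.1, σ.2.2)] = (true, g0) :: ts ∧ Good g0 ∧ ∀ t ∈ ts, Good t.2 := by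
  obtain ⟨hfin, hcur, hhd⟩ := h
  rcases e : σ.1 with _ | ⟨t, rest⟩
  · rw [e] at hhd
    exact ⟨σ.2.2, [], by simp [← hhd], hcur, by simp⟩
  · rw [e] at hhd
    refine ⟨t.2, rest ++ [(σ.2.1, σ.2.2)], ?_, hfin t (by rw [e]; simp), ?_⟩
    · have : t = (true, t.2) := by rw [Prod.ext_iff]; exact ⟨hhd, rfl⟩
      simp [← this]
    · intro u hu
      rcases List.mem_append.1 hu with h' | h'
      · exact hfin u (by rw [e]; simp [h'])
      · simp at h'; subst h'; exact hcur

-- no cut strictly inside a range of digit/sign positions: generic emptiness via pointwise falsity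
lemma filter_cutP_nil (expr : List Char) (a b : Nat)
    (h : ∀ k : Nat, a ≤ k → k < b → cutP expr ((k : Nat) : Int) = false) :
    (PySem.List.pyRange ((a : Nat) : Int) ((b : Nat) : Int) 1).filter (cutP expr) = [] := by
  rw [List.filter_eq_nil_iff]
  intro i hi
  rw [PySem.List.mem_pyRange_one] at hi
  have hi' : i = ((i.toNat : Nat) : Int) := by omega
  rw [hi', h i.toNat (by omega) (by omega)]
  simp

lemma flatTs_cons (t : Bool × List Char) (ts : List (Bool × List Char)) :
    flatTs (t :: ts) = sepC t.1 :: (t.2 ++ flatTs ts) := by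
  simp [flatTs]

lemma digit_not_sign {c : Char} (h : c.isDigit = true) : (c == '+' || c == '-') = false := by
  have h1 : (c == '+') = false := beq_eq_false_iff_ne.2 (isDigit_ne_plus h)
  have h2 : (c == '-') = false := beq_eq_false_iff_ne.2 (isDigit_ne_minus h)
  rw [h1, h2]; rfl

lemma good_head (g : List Char) (hg : Good g) (h0 : 0 < g.length) :
    (g[0]).isDigit = true ∨ g[0] = '-' := by
  obtain ⟨h, t, rfl, -, hh⟩ := hg
  rcases hh with h' | ⟨h', -⟩
  · exact Or.inl (by simpa using h')
  · exact Or.inr (by simpa using h')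

lemma sepC_sign (b : Bool) : (sepC b == '+' || sepC b == '-') = true := by
  cases b <;> decide

-- CUTS: the filtered boundary indices are exactly the separator positions.
lemma cuts_eq (ts : List (Bool × List Char)) :
    ∀ (pre expr : List Char), expr = pre ++ flatTs ts → 0 < pre.length →
      (expr.getD (pre.length - 1) '?').isDigit = true →
      (∀ t ∈ ts, Good t.2) →
      (PySem.List.pyRange ((pre.length : Nat) : Int) ((expr.length : Nat) : Int) 1).filter (cutP expr)
        = sepPos pre.length ts := by
  induction ts with
  | nil =>
    intro pre expr h _ _ _
    simp only [flatTs, List.map_nil, List.flatten_nil, List.append_nil] at h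
    subst h
    rw [PySem.List.pyRange_one_eq_nil (le_refl _)]
    rfl
  | cons t ts ih =>
    intro pre expr h hpos hlast hgood
    rw [flatTs_cons] at h
    have hgt : Good t.2 := hgood t List.mem_cons_self
    have htpos : 0 < t.2.length := good_pos _ hgt
    set n := pre.length with hn
    set g := t.2 with hgdef
    set m := n + 1 + g.length with hm
    have hexpr2 : expr = (pre ++ [sepC t.1]) ++ (g ++ flatTs ts) := by simp [h]
    have hexpr3 : expr = (pre ++ sepC t.1 :: g) ++ flatTs ts := by simp [h]
    have hL : expr.length = m + (flatTs ts).length := by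
      rw [hexpr3]; simp [hm]; omega
    have hsplit : PySem.List.pyRange ((n : Nat) : Int) ((expr.length : Nat) : Int) 1
        = PySem.List.pyRange ((n : Nat) : Int) ((m : Nat) : Int) 1
          ++ PySem.List.pyRange ((m : Nat) : Int) ((expr.length : Nat) : Int) 1 :=
      PySem.List.pyRange_one_append _ _ _ (by exact_mod_cast by omega) (by exact_mod_cast by omega)
    rw [hsplit, List.filter_append]
    have hcons : PySem.List.pyRange ((n : Nat) : Int) ((m : Nat) : Int) 1
        = ((n : Nat) : Int) :: PySem.List.pyRange (((n : Nat) : Int) + 1) ((m : Nat) : Int) 1 :=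
      PySem.List.pyRange_one_cons (by exact_mod_cast by omega)
    have hatn : ∀ d, PySem.List.pyGetD expr ((n : Nat) : Int) d = sepC t.1 := by
      intro d
      have h0 := pyGetD_append_right pre (sepC t.1 :: (g ++ flatTs ts)) 0 (by simp) d
      simpa [← h] using h0
    have hcutn : cutP expr ((n : Nat) : Int) = true := by
      unfold cutP
      rw [hatn, sepC_sign]
      have hc : ((n : Nat) : Int) - 1 = ((n - 1 : Nat) : Int) := by omega
      rw [hc, PySem.List.pyGetD_natCast, hlast]
      rfl
    have hinner : ∀ k : Nat, n + 1 ≤ k → k < m → cutP expr ((k : Nat) : Int) = false := by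
      intro k hk1 hk2
      have hj : k = (pre ++ [sepC t.1]).length + (k - (n + 1)) := by simp; omega
      set j := k - (n + 1) with hjdef
      have hjg : j < g.length := by omega
      have hat : PySem.List.pyGetD expr ((k : Nat) : Int) '?' = g[j] := by
        rw [hexpr2, hj]
        rw [pyGetD_append_right _ _ _ (by simp [hjg]; omega) _]
        exact List.getElem_append_left hjg
      rcases Nat.eq_zero_or_pos j with hj0 | hjpos
      · rcases good_head g hgt htpos with hd | hminus
        · unfold cutP
          simp only [hj0] at hat
          rw [hat, digit_not_sign hd]
          rfl
        · unfold cutP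
          have hk1' : ((k : Nat) : Int) - 1 = ((n : Nat) : Int) := by omega
          rw [hk1', hatn, isDigit_sepC]
          exact Bool.and_false _
      · unfold cutP
        rw [hat, digit_not_sign (good_getElem_digit g hgt j hjg hjpos)]
        rfl
    have hnil : (PySem.List.pyRange (((n : Nat) : Int) + 1) ((m : Nat) : Int) 1).filter (cutP expr) = [] := by
      have hc : ((n : Nat) : Int) + 1 = ((n + 1 : Nat) : Int) := by omega
      rw [hc]
      exact filter_cutP_nil expr (n + 1) m hinner
    have hlast' : (expr.getD ((pre ++ sepC t.1 :: g).length - 1) '?').isDigit = true := by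
      have hidx : (pre ++ sepC t.1 :: g).length - 1 = (pre ++ [sepC t.1]).length + (g.length - 1) := by
        simp; omega
      have h0 := pyGetD_append_right (pre ++ [sepC t.1]) (g ++ flatTs ts) (g.length - 1)
        (by simp; omega) '?'
      rw [PySem.List.pyGetD_natCast] at h0
      rw [← hexpr2, ← hidx] at h0
      rw [h0, List.getElem_append_left (by omega)]
      exact good_last_digit g hgt (by omega)
    have hrest := ih (pre ++ sepC t.1 :: g) expr hexpr3 (by simp) hlast'
      (fun u hu => hgood u (List.mem_cons_of_mem _ hu))
    have hplen : (pre ++ sepC t.1 :: g).length = m := by simp [hm]; omega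
    rw [hplen] at hrest
    rw [hcons]
    simp only [List.filter_cons, hcutn, if_pos, hnil, hrest]
    simp only [sepPos, hm]
    rfl

lemma slice_drop (expr : List Char) (s : Nat) :
    PySem.List.slice expr (some ((s : Nat) : Int)) (some ((expr.length : Nat) : Int))
      = expr.drop s := by
  rw [PySem.List.slice_natCast]
  exact List.take_of_length_le (by simp)

-- PIECES: slicing at the cut positions recovers the token literals.
lemma pieces_eq (ts : List (Bool × List Char)) :
    ∀ (s : Nat) (g expr : List Char), expr.drop s = g ++ flatTs ts →
      ((((s : Nat) : Int) :: sepPos (s + g.length) ts).zip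
          (sepPos (s + g.length) ts ++ [((expr.length : Nat) : Int)])).map
        (fun ab => PySem.List.slice expr (some ab.1) (some ab.2))
      = g :: ts.map (fun t => sepC t.1 :: t.2) := by
  induction ts with
  | nil =>
    intro s g expr h
    simp only [flatTs, List.map_nil, List.flatten_nil, List.append_nil] at h
    simp only [sepPos, List.nil_append, List.zip_cons_cons, List.zip_nil_right,
      List.map_cons, List.map_nil]
    rw [slice_drop, h]
  | cons t ts ih =>
    intro s g expr h
    rw [flatTs_cons] at h
    have hfirst : PySem.List.slice expr (some ((s : Nat) : Int)) (some ((s + g.length : Nat) : Int)) = g := by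
      rw [PySem.List.slice_natCast]
      have he : s + g.length - s = g.length := by omega
      rw [he, h]
      exact List.take_left' rfl
    have hdrop : expr.drop (s + g.length) = (sepC t.1 :: t.2) ++ flatTs ts := by
      rw [← List.drop_drop (j := s) (i := g.length), h]
      simp
    have hres := ih (s + g.length) (sepC t.1 :: t.2) expr hdrop
    have harith : s + g.length + (sepC t.1 :: t.2).length = s + g.length + 1 + t.2.length := by
      simp; omega
    rw [harith] at hres
    simp only [sepPos, List.cons_append, List.zip_cons_cons, List.map_cons, hfirst]
    rw [hres]

lemma pieceVal_tok (t : Bool × List Char) : pieceVal (sepC t.1 :: t.2) = sgnV t := by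
  have h1 : PySem.List.pyGetD (sepC t.1 :: t.2) 0 '?' = sepC t.1 := by
    have := pyGetD_append_left [sepC t.1] t.2 0 (by simp) '?'
    simpa using this
  have h2 : ∀ c : Char, PySem.List.slice (c :: t.2) (some 1) none = t.2 := by
    intro c
    have := PySem.List.slice_from_natCast (c :: t.2) 1
    simpa using this
  cases hb : t.1 <;> simp [pieceVal, sgnV, vG, h1, h2, sepC, hb]

-- ===== VERDICT (by name: the statement is the Claim_ definition above) =====
theorem makeSeq_spec : Claim_equal_makeSeq := by
  intro nums oprs _hd hpre
  obtain ⟨hlen, hglue⟩ := hpre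
  unfold Spec_makeSeq makeSeq makeSeq_alt
  have hslice : PySem.List.slice nums (some 1) none = nums.drop 1 := by
    simpa using PySem.List.slice_from_natCast nums 1
  set n0 : Int := PySem.List.pyGetD nums 0 0 with hn0
  set pairs : List (String × Int) := oprs.zip (nums.drop 1) with hpairs
  set σ := pairs.foldl tokStep ([], true, PySem.Int.toChars n0) with hσ
  have hσgood : GoodSt σ :=
    tok_good pairs _ hglue ⟨by simp, good_toChars n0, rfl⟩
  obtain ⟨g0, ts, hT, hg0, hts⟩ := good_shape σ hσgood
  have hg0pos := good_pos g0 hg0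
  -- A side reduces to sumT ((true, g0) :: ts)
  have hone : (1 : Int) = ((1 : Nat) : Int) := by norm_cast
  have hfoldA : (oprs.foldl (stepA nums) ((1 : Int), PySem.Int.toChars n0, true, 0)).2
      = (σ.2.2, σ.2.1, sumT σ.1) := by
    rw [hone, foldA_reindex oprs nums 1 _ (by omega)]
    exact fpA_tok pairs ([], true, PySem.Int.toChars n0)
  have htmp : σ.2.2 ≠ [] := good_ne_nil _ hσgood.2.1
  have hresA : sumT σ.1 + (if σ.2.1 = true then (PySem.Int.ofChars? σ.2.2).getD 0
      else -1 * (PySem.Int.ofChars? σ.2.2).getD 0) = sumT ((true, g0) :: ts) := by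
    rw [← hT, sumT_append_singleton]
    simp only [sgnV, vG]
    split <;> ring
  -- B side: the rendered string
  have hrender : pairs.foldl renderStep (PySem.Int.toChars n0) = g0 ++ flatTs ts := by
    have h0 : exprOfT (([] : List (Bool × List Char)) ++ [(true, PySem.Int.toChars n0)])
        = PySem.Int.toChars n0 := by simp [exprOfT, flatTs]
    rw [← h0, render_tok pairs ([], true, PySem.Int.toChars n0), ← hσ, hT]
    rfl
  -- the cut positions
  have hnil1 : (PySem.List.pyRange ((1 : Nat) : Int) ((g0.length : Nat) : Int) 1).filter
      (cutP (g0 ++ flatTs ts)) = [] := by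
    refine filter_cutP_nil _ 1 g0.length (fun k hk1 hk2 => ?_)
    unfold cutP
    rw [pyGetD_append_left g0 (flatTs ts) k (by omega) '?',
      digit_not_sign (good_getElem_digit g0 hg0 k (by omega) (by omega))]
    rfl
  have hlast0 : ((g0 ++ flatTs ts).getD (g0.length - 1) '?').isDigit = true := by
    have h0 := pyGetD_append_left g0 (flatTs ts) (g0.length - 1) (by omega) '?'
    rw [PySem.List.pyGetD_natCast] at h0
    rw [h0]
    exact good_last_digit g0 hg0 (by omega)
  have hcuts : (PySem.List.pyRange 1 (((g0 ++ flatTs ts).length : Nat) : Int) 1).filter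
      (cutP (g0 ++ flatTs ts)) = sepPos g0.length ts := by
    have hsp := PySem.List.pyRange_one_append ((1 : Nat) : Int) ((g0.length : Nat) : Int)
      (((g0 ++ flatTs ts).length : Nat) : Int) (by exact_mod_cast hg0pos)
      (by exact_mod_cast (by simp : g0.length ≤ (g0 ++ flatTs ts).length))
    have hnil1' := hnil1
    simp only [Nat.cast_one] at hsp hnil1'
    rw [hsp, List.filter_append, hnil1', cuts_eq ts g0 _ rfl hg0pos hlast0 hts]
    rfl
  have hpieces := pieces_eq ts 0 g0 (g0 ++ flatTs ts) (by simp)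
  simp only [Nat.cast_zero, Nat.zero_add] at hpieces
  -- evaluating the pieces
  have hget0 : PySem.List.pyGetD (g0 :: ts.map (fun t => sepC t.1 :: t.2)) 0 [] = g0 := by
    rw [show (0 : Int) = ((0 : Nat) : Int) from by norm_cast, PySem.List.pyGetD_natCast]
    rfl
  have hdrop1 : PySem.List.slice (g0 :: ts.map (fun t => sepC t.1 :: t.2)) (some 1) none
      = ts.map (fun t => sepC t.1 :: t.2) := by
    simpa using PySem.List.slice_from_natCast (g0 :: ts.map (fun t => sepC t.1 :: t.2)) 1
  have hmap : (ts.map (fun t => sepC t.1 :: t.2)).map pieceVal = ts.map sgnV := by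
    rw [List.map_map]
    exact List.map_congr_left (fun t _ => pieceVal_tok t)
  have htotal : (PySem.Int.ofChars? g0).getD 0 + (ts.map sgnV).sum = sumT ((true, g0) :: ts) := by
    simp [sumT, sgnV, vG]
  -- assemble
  simp only [hslice, ← hpairs, hfoldA, hrender, hcuts, hpieces, hget0, hdrop1, hmap, htotal]
  simp only [ne_eq, htmp, not_false_iff, if_true, hresA]
  by_cases hz : sumT ((true, g0) :: ts) = 0 <;> simp [hz]
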